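-- pv_equiv track=rewrite | github.com/TianchenGuan/ComponentBench | scripts/clean_traces.py | split_segments
-- ===== SOURCE A (Python) =====
-- def split_segments(steps: list[dict]) -> list[list[dict]]:
--     """Split trace into segments wherever step index resets."""
--     if not steps:
--         return []
--     segments: list[list[dict]] = [[]]
--     prev_i = -1
--     for s in steps:
--         i = s.get("i", 0)
--         if i <= prev_i or (i == 0 and prev_i >= 0):
--             segments.append([])
--         segments[-1].append(s)
--         prev_i = i
--     return [seg for seg in segments if seg]
-- ===== SOURCE B (Python) =====
-- def split_segments(steps: list[dict]) -> list[list[dict]]: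
--     """Split trace into segments wherever step index resets.
--
--     Built right-to-left: each step is prepended to the segment that follows it
--     unless the following step's index resets (is <= the current one)."""
--     res: list[list[dict]] = []
--     for s in reversed(steps):
--         if res and res[0][0].get("i", 0) > s.get("i", 0):
--             res[0] = [s] + res[0]
--         else:
--             res = [[s]] + res
--     return res
-- ===== Notes on version B (the rewrite author's own statement) =====
-- stated objective: alternative
-- what changed: B builds the segments back-to-front with a single reversed pass that prepends each step to the following segment or starts a new one, eliminating A's prev_i=-1 sentinel, the seeded-empty-segment list, and the final empty-segment filter.
import Mathlib
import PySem

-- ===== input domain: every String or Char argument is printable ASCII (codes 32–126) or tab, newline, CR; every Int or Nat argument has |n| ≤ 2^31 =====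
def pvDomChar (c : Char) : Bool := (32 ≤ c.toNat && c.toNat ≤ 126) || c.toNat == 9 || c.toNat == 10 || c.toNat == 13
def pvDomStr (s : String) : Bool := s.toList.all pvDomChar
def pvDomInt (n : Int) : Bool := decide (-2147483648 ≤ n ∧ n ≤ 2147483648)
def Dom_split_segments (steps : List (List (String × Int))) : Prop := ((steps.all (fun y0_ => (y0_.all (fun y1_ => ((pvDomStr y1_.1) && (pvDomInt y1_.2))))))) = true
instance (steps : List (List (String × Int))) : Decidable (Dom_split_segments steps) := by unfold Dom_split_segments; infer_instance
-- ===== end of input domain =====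

-- B builds the result back-to-front in one reversed pass (no sentinel prev_i, no empty-segment filter);
-- same return value as A, no speed claim.

-- s.get("i", 0) on the association-list dict representation: first match, default 0 (exact for dicts, whose keys are unique)
def pvGetI (s : List (String × Int)) : Int :=
  match s.find? (fun p => p.1 == "i") with
  | some p => p.2
  | none => 0

-- ===== PORT A =====
-- segments[-1].append(s): append s to the last segment of the list
def pvUpdLast (segs : List (List (List (String × Int)))) (s : List (String × Int)) :
    List (List (List (String × Int))) :=
  match segs with
  | [] => []
  | [g] => [g ++ [s]]
  | g :: rest => g :: pvUpdLast rest s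

-- one iteration of A's for-loop: state = (segments, prev_i)
def pvStepA (st : List (List (List (String × Int))) × Int) (s : List (String × Int)) :
    List (List (List (String × Int))) × Int :=
  let i := pvGetI s
  let segs := if i ≤ st.2 ∨ (i = 0 ∧ 0 ≤ st.2) then st.1 ++ [[]] else st.1
  (pvUpdLast segs s, i)

def split_segments (steps : List (List (String × Int))) : List (List (List (String × Int))) :=
  if steps = [] then []
  else
    let st := steps.foldl pvStepA ([[]], -1)
    st.1.filter (fun seg => !seg.isEmpty)

-- ===== PORT B =====
-- one iteration of B's reversed loop: prepend s to the front segment unless its head's index resets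
def pvStepB (s : List (String × Int)) (res : List (List (List (String × Int)))) :
    List (List (List (String × Int))) :=
  match res with
  | (t :: g) :: rest =>
      if pvGetI t > pvGetI s then (s :: t :: g) :: rest else [s] :: (t :: g) :: rest
  | _ => [s] :: res

def split_segments_alt (steps : List (List (String × Int))) : List (List (List (String × Int))) :=
  steps.foldr pvStepB []

-- ===== PRECONDITION & SPEC =====
def Spec_split_segments (steps : List (List (String × Int))) (out : List (List (List (String × Int)))) : Prop := out = split_segments_alt steps
instance (steps : List (List (String × Int))) (out : List (List (List (String × Int)))) : Decidable (Spec_split_segments steps out) := by unfold Spec_split_segments; infer_instance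

-- ===== CLAIM (what is proved, stated in full; the proofs are below) =====
def Claim_equal_split_segments : Prop := ∀ (steps : List (List (String × Int))), Dom_split_segments steps → Spec_split_segments steps (split_segments steps)

-- ===== LEMMAS AND PROOFS =====

-- recursive description of A's loop: 'consume cur p l' finishes the open segment cur with prev index p
def pvConsume (cur : List (List (String × Int))) (p : Int) (l : List (List (String × Int))) :
    List (List (List (String × Int))) :=
  match l with
  | [] => [cur]
  | s :: l' =>
      if pvGetI s ≤ p ∨ (pvGetI s = 0 ∧ 0 ≤ p) then cur :: pvConsume [s] (pvGetI s) l'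
      else pvConsume (cur ++ [s]) (pvGetI s) l'

-- join an open segment cur (prev index p) onto a grouped tail
def pvJoin (cur : List (List (String × Int))) (p : Int) (r : List (List (List (String × Int)))) :
    List (List (List (String × Int))) :=
  match r with
  | (t :: g) :: rest => if pvGetI t ≤ p then cur :: (t :: g) :: rest else (cur ++ t :: g) :: rest
  | _ => [cur]

theorem pvUpdLast_append (acc : List (List (List (String × Int)))) (cur : List (List (String × Int)))
    (s : List (String × Int)) : pvUpdLast (acc ++ [cur]) s = acc ++ [cur ++ [s]] := by
  induction acc with
  | nil => rfl
  | cons a acc ih =>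
      cases acc with
      | nil => simp [pvUpdLast]
      | cons b acc' => simpa [pvUpdLast] using ih

theorem pvFoldlA (l : List (List (String × Int))) :
    ∀ (acc : List (List (List (String × Int)))) (cur : List (List (String × Int))) (p : Int),
    (l.foldl pvStepA (acc ++ [cur], p)).1 = acc ++ pvConsume cur p l := by
  induction l with
  | nil => intro acc cur p; simp [pvConsume]
  | cons s l ih =>
      intro acc cur p
      by_cases h : pvGetI s ≤ p ∨ (pvGetI s = 0 ∧ 0 ≤ p)
      · have : pvStepA (acc ++ [cur], p) s = ((acc ++ [cur]) ++ [[s]], pvGetI s) := by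
          simp [pvStepA, h]
          simpa using pvUpdLast_append (acc ++ [cur]) [] s
        simp only [List.foldl_cons, this, ih]
        simp [pvConsume, h]
      · have : pvStepA (acc ++ [cur], p) s = (acc ++ [cur ++ [s]], pvGetI s) := by
          simp [pvStepA, h, pvUpdLast_append]
        simp only [List.foldl_cons, this, ih]
        simp [pvConsume, h]

theorem pvAlt_ne (l : List (List (String × Int))) :
    ∀ g ∈ split_segments_alt l, g ≠ [] := by
  induction l with
  | nil => intro g hg; simp [split_segments_alt] at hg
  | cons s l ih =>
      intro g hg
      have hstep : split_segments_alt (s :: l) = pvStepB s (split_segments_alt l) := rfl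
      rw [hstep] at hg
      rcases hr : split_segments_alt l with _ | ⟨g1, rest⟩
      · rw [hr] at hg; simp [pvStepB] at hg; simp [hg]
      · rcases g1 with _ | ⟨t, g'⟩
        · exact absurd rfl (ih [] (by rw [hr]; exact List.mem_cons_self))
        · rw [hr] at hg
          by_cases hc : pvGetI t > pvGetI s
          · simp [pvStepB, hc] at hg
            rcases hg with hg | hg
            · simp [hg]
            · exact ih g (by rw [hr]; exact List.mem_cons_of_mem _ hg)
          · simp [pvStepB, hc] at hg
            rcases hg with hg | hg | hg
            · simp [hg]
            · simp [hg]
            · exact ih g (by rw [hr]; exact List.mem_cons_of_mem _ hg)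

-- main bridge: A's open-segment recursion equals B's grouping joined with the open segment
theorem pvConsume_eq_join (l : List (List (String × Int))) :
    ∀ (cur : List (List (String × Int))) (p : Int), cur ≠ [] →
    pvConsume cur p l = pvJoin cur p (split_segments_alt l) := by
  induction l with
  | nil => intro cur p _; rfl
  | cons t l' ih =>
      intro cur p hcur
      have hcond : (pvGetI t ≤ p ∨ (pvGetI t = 0 ∧ 0 ≤ p)) ↔ pvGetI t ≤ p := by omega
      have hstep : split_segments_alt (t :: l') = pvStepB t (split_segments_alt l') := rfl
      by_cases h : pvGetI t ≤ p
      · -- cut before t: A starts segment [t]; B's first group of (t::l') also starts at t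
        have : pvConsume cur p (t :: l') = cur :: pvConsume [t] (pvGetI t) l' := by
          simp only [pvConsume]; rw [if_pos (hcond.mpr h)]
        rw [this, ih [t] (pvGetI t) (by simp)]
        rcases hr : split_segments_alt l' with _ | ⟨g1, rest⟩
        · simp [hstep, hr, pvStepB, pvJoin, h]
        · rcases g1 with _ | ⟨u, g'⟩
          · exact absurd rfl (pvAlt_ne l' [] (by rw [hr]; exact List.mem_cons_self))
          · by_cases hu : pvGetI u ≤ pvGetI t
            · simp [hstep, hr, pvStepB, pvJoin, h, hu, not_lt.mpr hu]
            · simp [hstep, hr, pvStepB, pvJoin, h, hu, lt_of_not_ge hu]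
      · -- t extends cur
        have : pvConsume cur p (t :: l') = pvConsume (cur ++ [t]) (pvGetI t) l' := by
          simp only [pvConsume]; rw [if_neg (fun hc => h (hcond.mp hc))]
        rw [this, ih (cur ++ [t]) (pvGetI t) (by simp)]
        rcases hr : split_segments_alt l' with _ | ⟨g1, rest⟩
        · simp [hstep, hr, pvStepB, pvJoin, h]
        · rcases g1 with _ | ⟨u, g'⟩
          · exact absurd rfl (pvAlt_ne l' [] (by rw [hr]; exact List.mem_cons_self))
          · by_cases hu : pvGetI u ≤ pvGetI t
            · simp [hstep, hr, pvStepB, pvJoin, h, hu, not_lt.mpr hu]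
            · simp [hstep, hr, pvStepB, pvJoin, h, hu, lt_of_not_ge hu]

theorem pvJoin_singleton (s : List (String × Int)) (l : List (List (String × Int))) :
    pvJoin [s] (pvGetI s) (split_segments_alt l) = split_segments_alt (s :: l) := by
  have hstep : split_segments_alt (s :: l) = pvStepB s (split_segments_alt l) := rfl
  rcases hr : split_segments_alt l with _ | ⟨g1, rest⟩
  · simp [hstep, hr, pvJoin, pvStepB]
  · rcases g1 with _ | ⟨u, g'⟩
    · exact absurd rfl (pvAlt_ne l [] (by rw [hr]; exact List.mem_cons_self))
    · by_cases hu : pvGetI u ≤ pvGetI s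
      · simp [hstep, hr, pvJoin, pvStepB, hu, not_lt.mpr hu]
      · simp [hstep, hr, pvJoin, pvStepB, hu, lt_of_not_ge hu]

theorem pvFilter_alt (l : List (List (String × Int))) :
    (split_segments_alt l).filter (fun seg => !seg.isEmpty) = split_segments_alt l := by
  apply List.filter_eq_self.mpr
  intro g hg
  have := pvAlt_ne l g hg
  cases g with
  | nil => exact absurd rfl this
  | cons a g' => simp

-- ===== VERDICT (by name: the statement is the Claim_ definition above) =====
theorem split_segments_spec : Claim_equal_split_segments := by
  intro steps _
  unfold Spec_split_segments
  cases steps with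
  | nil => rfl
  | cons s l =>
      have h1 : split_segments (s :: l) =
          ((s :: l).foldl pvStepA ([[]], -1)).1.filter (fun seg => !seg.isEmpty) := by
        simp [split_segments]
      have h2 : ((s :: l).foldl pvStepA (([] : List (List (List (String × Int)))) ++ [[]], -1)).1
          = [] ++ pvConsume [] (-1) (s :: l) := pvFoldlA (s :: l) [] [] (-1)
      simp only [List.nil_append] at h2
      rw [h1, h2]
      have key : pvConsume [s] (pvGetI s) l = split_segments_alt (s :: l) := by
        rw [pvConsume_eq_join l [s] (pvGetI s) (by simp), pvJoin_singleton]
      by_cases h : pvGetI s ≤ -1 ∨ (pvGetI s = 0 ∧ 0 ≤ (-1 : Int))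
      · have : pvConsume [] (-1) (s :: l) = [] :: pvConsume [s] (pvGetI s) l := by
          simp [pvConsume]; omega
        rw [this]
        simp only [List.filter, List.isEmpty_nil, Bool.not_true]
        rw [key]
        exact pvFilter_alt (s :: l)
      · have : pvConsume [] (-1) (s :: l) = pvConsume [s] (pvGetI s) l := by
          simp [pvConsume]; omega
        rw [this, key]
        exact pvFilter_alt (s :: l)
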